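-- pv_equiv track=rewrite | github.com/holistic-ai/holisticai | holisticai/bias/mitigation/commons/disparate_impact_remover/_categorical_repairer.py | compute_stratified_group_data
-- ===== SOURCE A (Python) =====
-- from collections import defaultdict
-- from collections import defaultdict
--
-- def compute_stratified_group_data(data_dict, stratified_group_indices, all_stratified_groups):
--     stratified_group_data = defaultdict(dict)
--     for group in all_stratified_groups:
--         for col_id, col_dict in data_dict.items():
--             indices = defaultdict(list)
--             for i in stratified_group_indices[group]:
--                 value = col_dict[i]
--                 indices[value].append(i)
--             stratified_col_values = sorted((occurs, val) for val, occurs in indices.items())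
--             stratified_col_values.sort(key=lambda tup: tup[1])
--             stratified_group_data[group][col_id] = stratified_col_values
--     return stratified_group_data
-- ===== SOURCE B (Python) =====
-- from itertools import groupby
--
--
-- def compute_stratified_group_data(data_dict, stratified_group_indices, all_stratified_groups):
--     result = {}
--     for group in all_stratified_groups:
--         for col_id, col_dict in data_dict.items():
--             ordered = sorted(stratified_group_indices[group], key=lambda i: col_dict[i])
--             runs = [(list(run), val)
--                     for val, run in groupby(ordered, key=lambda i: col_dict[i])]
--             result.setdefault(group, {})[col_id] = runs
--     return result
-- ===== Notes on version B (the rewrite author's own statement) =====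
-- stated objective: idiomatic
-- what changed: Instead of accumulating per-value index buckets in a defaultdict and then sorting the (bucket, value) tuples twice, B stably sorts each group's indices by their column value once and emits the runs of equal value with itertools.groupby. Pre_ excludes only the inputs where both programs raise KeyError (a listed group missing from stratified_group_indices, or an index missing from a column dict, with nonempty data_dict).
import Mathlib
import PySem

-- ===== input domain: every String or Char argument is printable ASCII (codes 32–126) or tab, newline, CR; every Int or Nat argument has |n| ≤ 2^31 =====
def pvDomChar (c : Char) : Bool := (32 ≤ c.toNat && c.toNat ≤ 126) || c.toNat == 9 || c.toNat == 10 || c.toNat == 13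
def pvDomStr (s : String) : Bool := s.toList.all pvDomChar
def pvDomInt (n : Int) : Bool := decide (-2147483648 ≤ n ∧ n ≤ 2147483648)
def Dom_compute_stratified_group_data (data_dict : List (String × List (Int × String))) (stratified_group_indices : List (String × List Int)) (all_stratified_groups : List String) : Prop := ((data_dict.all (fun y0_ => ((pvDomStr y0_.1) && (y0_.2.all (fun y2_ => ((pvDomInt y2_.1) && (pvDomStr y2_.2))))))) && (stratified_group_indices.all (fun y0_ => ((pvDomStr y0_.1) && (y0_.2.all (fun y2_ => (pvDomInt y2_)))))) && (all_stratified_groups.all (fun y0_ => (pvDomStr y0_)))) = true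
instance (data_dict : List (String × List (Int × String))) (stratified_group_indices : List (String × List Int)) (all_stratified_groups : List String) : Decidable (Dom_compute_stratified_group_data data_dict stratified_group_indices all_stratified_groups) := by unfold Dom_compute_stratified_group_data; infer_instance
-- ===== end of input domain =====

-- B replaces A's defaultdict bucket accumulation plus double sort of (bucket, value)
-- tuples by a single stable sort of the indices by value followed by grouping
-- consecutive runs of equal value (itertools.groupby); same results, more idiomatic.

-- ===== PORT A =====
def compute_stratified_group_data (data_dict : List (String × List (Int × String))) (stratified_group_indices : List (String × List Int)) (all_stratified_groups : List String) : List (String × List (String × List (List Int × String))) :=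
  let dd := PySem.Dict.ofList data_dict
  let sgi := PySem.Dict.ofList stratified_group_indices
  let final : PySem.Dict String (PySem.Dict String (List (List Int × String))) :=
    all_stratified_groups.foldl (fun d group =>
      dd.items.foldl (fun d pc =>
        let col_dict := PySem.Dict.ofList pc.2
        -- indices = defaultdict(list); for i in stratified_group_indices[group]: indices[col_dict[i]].append(i)
        -- (col_dict[i] / stratified_group_indices[group] are KeyErrors outside Pre_: total getD forms)
        let indices : PySem.Dict String (List Int) :=
          (sgi.getD group []).foldl
            (fun b i => b.modify (col_dict.getD i "") [] (fun occ => occ ++ [i]))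
            PySem.Dict.empty
        -- sorted((occurs, val) for val, occurs in indices.items())  (tuple comparison)
        let scv := PySem.List.sorted2 (indices.items.map (fun q => (q.2, q.1)))
          (fun t => t.1) (fun t => t.2) false
        -- stratified_col_values.sort(key=lambda tup: tup[1])  (stable in-place sort)
        let scv2 := PySem.List.sorted scv (fun t => t.2) false
        d.insert group ((d.getD group PySem.Dict.empty).insert pc.1 scv2)) d)
      PySem.Dict.empty
  final.items.map (fun p => (p.1, p.2.items))

-- ===== PORT B =====
-- itertools.groupby(ordered, key=k) consumed as [(list(run), val) for val, run in …]:
-- consecutive runs of equal key value, each emitted as (indices_of_run, value).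
def pvRuns (k : Int → String) : List Int → List (List Int × String)
  | [] => []
  | i :: rest =>
    match pvRuns k rest with
    | [] => [([i], k i)]
    | (r, v) :: rs => if k i == v then (i :: r, v) :: rs else ([i], k i) :: (r, v) :: rs

def compute_stratified_group_data_alt (data_dict : List (String × List (Int × String))) (stratified_group_indices : List (String × List Int)) (all_stratified_groups : List String) : List (String × List (String × List (List Int × String))) :=
  let dd := PySem.Dict.ofList data_dict
  let sgi := PySem.Dict.ofList stratified_group_indices
  let final : PySem.Dict String (PySem.Dict String (List (List Int × String))) :=
    all_stratified_groups.foldl (fun d group =>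
      dd.items.foldl (fun d pc =>
        let col_dict := PySem.Dict.ofList pc.2
        -- ordered = sorted(stratified_group_indices[group], key=lambda i: col_dict[i])  (stable)
        let ordered := PySem.List.sorted (sgi.getD group []) (fun i => col_dict.getD i "") false
        -- result.setdefault(group, {})[col_id] = runs
        d.insert group ((d.getD group PySem.Dict.empty).insert pc.1
          (pvRuns (fun i => col_dict.getD i "") ordered))) d)
      PySem.Dict.empty
  final.items.map (fun p => (p.1, p.2.items))

-- ===== PRECONDITION & SPEC =====
-- Pre_ excludes exactly the KeyErrors (both A and B raise there): when data_dict is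
-- nonempty, every listed group must be a key of stratified_group_indices and every index
-- of that group must be a key of every column dict; with empty data_dict no lookup
-- happens in either program, so those inputs are admitted.
def Pre_compute_stratified_group_data (data_dict : List (String × List (Int × String))) (stratified_group_indices : List (String × List Int)) (all_stratified_groups : List String) : Prop :=
  data_dict = [] ∨
  ∀ g ∈ all_stratified_groups,
    (PySem.Dict.ofList stratified_group_indices).contains g = true ∧
    ∀ i ∈ (PySem.Dict.ofList stratified_group_indices).getD g [],
      ∀ p ∈ (PySem.Dict.ofList data_dict).items, (PySem.Dict.ofList p.2).contains i = true
instance (data_dict : List (String × List (Int × String))) (stratified_group_indices : List (String × List Int)) (all_stratified_groups : List String) : Decidable (Pre_compute_stratified_group_data data_dict stratified_group_indices all_stratified_groups) := by unfold Pre_compute_stratified_group_data; infer_instance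

def pvWitness_compute_stratified_group_data : (List (String × List (Int × String))) × (List (String × List Int)) × List String :=
  ([("age", [(0, "young"), (1, "old"), (2, "young")])], [("g", [0, 1, 2]), ("h", [1])], ["g", "h"])

def Spec_compute_stratified_group_data (data_dict : List (String × List (Int × String))) (stratified_group_indices : List (String × List Int)) (all_stratified_groups : List String) (out : List (String × List (String × List (List Int × String)))) : Prop := out = compute_stratified_group_data_alt data_dict stratified_group_indices all_stratified_groups
-- instance search fails at this nesting depth; the same instance built explicitly:
def pvDecEq1 : DecidableEq (String × List (List Int × String)) := fun a b => by infer_instance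
def pvDecEq2 : DecidableEq (String × List (String × List (List Int × String))) :=
  fun a b => @instDecidableEqProd _ _ _ (@List.hasDecEq _ pvDecEq1) a b
def pvDecEqOut : DecidableEq (List (String × List (String × List (List Int × String)))) :=
  @List.hasDecEq _ pvDecEq2
instance (data_dict : List (String × List (Int × String))) (stratified_group_indices : List (String × List Int)) (all_stratified_groups : List String) (out : List (String × List (String × List (List Int × String)))) : Decidable (Spec_compute_stratified_group_data data_dict stratified_group_indices all_stratified_groups out) := by unfold Spec_compute_stratified_group_data; exact pvDecEqOut _ _

-- ===== CLAIM (what is proved, stated in full; the proofs are below) =====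
def Claim_equal_compute_stratified_group_data : Prop := ∀ (data_dict : List (String × List (Int × String))) (stratified_group_indices : List (String × List Int)) (all_stratified_groups : List String), Dom_compute_stratified_group_data data_dict stratified_group_indices all_stratified_groups → Pre_compute_stratified_group_data data_dict stratified_group_indices all_stratified_groups → Spec_compute_stratified_group_data data_dict stratified_group_indices all_stratified_groups (compute_stratified_group_data data_dict stratified_group_indices all_stratified_groups)

-- ===== LEMMAS AND PROOFS =====

-- one-step unfolding of pvRuns on a cons cell
theorem pvRuns_cons (k : Int → String) (i : Int) (rest : List Int) :
    pvRuns k (i :: rest)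
      = match pvRuns k rest with
        | [] => [([i], k i)]
        | (r, v) :: rs => if k i == v then (i :: r, v) :: rs else ([i], k i) :: (r, v) :: rs := rfl

-- head run of a nonempty list carries the key of the head element
theorem pvRuns_head (k : Int → String) (j : Int) (t : List Int) :
    ∃ r rs, pvRuns k (j :: t) = (r, k j) :: rs := by
  cases h : pvRuns k t with
  | nil => exact ⟨[j], [], by rw [pvRuns_cons, h]⟩
  | cons hd tl =>
    obtain ⟨r, v⟩ := hd
    by_cases hb : (k j == v) = true
    · have hv : v = k j := (eq_of_beq hb).symm
      subst hv
      exact ⟨j :: r, tl, by rw [pvRuns_cons, h]; simp⟩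
    · exact ⟨[j], (r, v) :: tl, by rw [pvRuns_cons, h]; simp [hb]⟩

-- run values strictly increase along a sorted list
theorem pvRuns_pairwise (k : Int → String) :
    ∀ xs : List Int, xs.Pairwise (fun a b => k a ≤ k b) →
      (pvRuns k xs).Pairwise (fun a b => a.2 < b.2) := by
  intro xs
  induction xs with
  | nil => intro _; simp [pvRuns]
  | cons i rest ih =>
    intro h
    obtain ⟨hi, hrest⟩ := List.pairwise_cons.mp h
    have ihr := ih hrest
    cases rest with
    | nil => simp [pvRuns]
    | cons j t =>
      obtain ⟨r, rs, hr⟩ := pvRuns_head k j t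
      rw [hr] at ihr
      obtain ⟨hhead, hrs⟩ := List.pairwise_cons.mp ihr
      by_cases hb : (k i == k j) = true
      · have hruns : pvRuns k (i :: j :: t) = (i :: r, k j) :: rs := by
          rw [pvRuns_cons, hr]; simp [hb]
        rw [hruns]
        exact List.pairwise_cons.mpr ⟨hhead, hrs⟩
      · have hij : k i < k j :=
          lt_of_le_of_ne (hi j (by simp)) (fun hcon => hb (by simp [hcon]))
        have hruns : pvRuns k (i :: j :: t) = ([i], k i) :: (r, k j) :: rs := by
          rw [pvRuns_cons, hr]; simp [hb]
        rw [hruns]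
        refine List.pairwise_cons.mpr ⟨?_, ihr⟩
        intro b hbmem
        rcases List.mem_cons.mp hbmem with h1 | h2
        · rw [h1]; exact hij
        · exact lt_trans hij (hhead b h2)

-- membership characterisation of the runs of a sorted list
theorem pvRuns_mem (k : Int → String) :
    ∀ xs : List Int, xs.Pairwise (fun a b => k a ≤ k b) →
      ∀ p : List Int × String,
        (p ∈ pvRuns k xs ↔ ∃ v, v ∈ xs.map k ∧ p = (xs.filter (fun i => k i == v), v)) := by
  intro xs
  induction xs with
  | nil => intro _ p; simp [pvRuns]
  | cons i rest ih =>
    intro h p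
    obtain ⟨hi, hrest⟩ := List.pairwise_cons.mp h
    have ihm := ih hrest
    cases rest with
    | nil =>
      constructor
      · intro hp
        have hp' : p = ([i], k i) := by simpa [pvRuns] using hp
        exact ⟨k i, by simp, by simp [hp']⟩
      · rintro ⟨v, hv, rfl⟩
        have hv' : v = k i := by simpa using hv
        subst hv'
        simp [pvRuns]
    | cons j t =>
      obtain ⟨r, rs, hr⟩ := pvRuns_head k j t
      have hrs_gt : ∀ q ∈ rs, k j < q.2 := by
        have hp := pvRuns_pairwise k (j :: t) hrest
        rw [hr] at hp
        exact fun q hq => (List.pairwise_cons.mp hp).1 q hq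
      have hhead_spec := (ihm (r, k j)).mp (by rw [hr]; exact List.mem_cons_self)
      obtain ⟨v0, hv0mem, hv0eq⟩ := hhead_spec
      have hv0 : v0 = k j := (congrArg Prod.snd hv0eq).symm
      have hrfil : r = (j :: t).filter (fun i' => k i' == k j) := by
        have := congrArg Prod.fst hv0eq
        simpa [← hv0] using this
      have htail_spec : ∀ q ∈ rs, q.2 ∈ (j :: t).map k ∧
          q = ((j :: t).filter (fun i' => k i' == q.2), q.2) := by
        intro q hq
        obtain ⟨v, hv, heq⟩ := (ihm q).mp (by rw [hr]; exact List.mem_cons_of_mem _ hq)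
        subst heq
        exact ⟨hv, by simp⟩
      by_cases hb : (k i == k j) = true
      · -- merge: runs (i :: j :: t) = (i :: r, k j) :: rs
        have hkij : k i = k j := eq_of_beq hb
        have hruns : pvRuns k (i :: j :: t) = (i :: r, k j) :: rs := by
          rw [pvRuns_cons, hr]; simp [hb]
        have hfil : (i :: j :: t).filter (fun i' => k i' == k j) = i :: r := by
          simp only [List.filter_cons, hb, if_true, ← hrfil]
        rw [hruns]
        constructor
        · intro hp
          rcases List.mem_cons.mp hp with rfl | hp'
          · exact ⟨k j, by simp, by rw [hfil]⟩
          · obtain ⟨hv1, hv2⟩ := htail_spec p hp'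
            refine ⟨p.2, ?_, ?_⟩
            · rw [List.map_cons]; exact List.mem_cons_of_mem _ hv1
            · have hne : (k i == p.2) = false := by
                rw [beq_eq_false_iff_ne]
                exact (hkij ▸ hrs_gt p hp').ne
              have hfil2 : (i :: j :: t).filter (fun i' => k i' == p.2)
                  = (j :: t).filter (fun i' => k i' == p.2) := by
                simp [List.filter_cons, hne]
              rw [hfil2, ← hv2]
        · rintro ⟨v, hv, rfl⟩
          by_cases hvi : v = k i
          · subst hvi
            rw [hkij, hfil]
            exact List.mem_cons_self
          · have hvrest : v ∈ (j :: t).map k := by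
              rcases List.mem_cons.mp (by rwa [List.map_cons] at hv) with h1 | h1
              · exact absurd h1 hvi
              · exact h1
            have hne : (k i == v) = false := by
              rw [beq_eq_false_iff_ne]
              exact fun h' => hvi h'.symm
            have hfil2 : (i :: j :: t).filter (fun i' => k i' == v)
                = (j :: t).filter (fun i' => k i' == v) := by
              simp [List.filter_cons, hne]
            rw [hfil2]
            have hmem' : ((j :: t).filter (fun i' => k i' == v), v) ∈ pvRuns k (j :: t) :=
              (ihm _).mpr ⟨v, hvrest, rfl⟩
            rw [hr] at hmem'
            rcases List.mem_cons.mp hmem' with heq | hmem''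
            · exfalso
              have : v = k j := congrArg Prod.snd heq
              exact hvi (this.trans hkij.symm)
            · exact List.mem_cons_of_mem _ hmem''
      · -- new run: runs (i :: j :: t) = ([i], k i) :: (r, k j) :: rs
        have hij : k i < k j :=
          lt_of_le_of_ne (hi j (by simp)) (fun hcon => hb (by simp [hcon]))
        have hgt : ∀ b ∈ (j :: t), k i < k b := by
          intro b hbm
          rcases List.mem_cons.mp hbm with rfl | hbm'
          · exact hij
          · exact lt_of_lt_of_le hij ((List.pairwise_cons.mp hrest).1 b hbm')
        have hgt' : ∀ v ∈ (j :: t).map k, k i < v := by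
          intro v hvm
          obtain ⟨b, hbm, rfl⟩ := List.mem_map.mp hvm
          exact hgt b hbm
        have hruns : pvRuns k (i :: j :: t) = ([i], k i) :: (r, k j) :: rs := by
          rw [pvRuns_cons, hr]; simp [hb]
        have hfilnil : (j :: t).filter (fun i' => k i' == k i) = [] := by
          apply List.filter_eq_nil_iff.mpr
          intro a ha
          simp only [beq_iff_eq]
          exact (hgt a ha).ne'
        have hfili : (i :: j :: t).filter (fun i' => k i' == k i) = [i] := by
          simp [hfilnil]
        rw [hruns]
        constructor
        · intro hp
          rcases List.mem_cons.mp hp with rfl | hp'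
          · exact ⟨k i, by simp, by rw [hfili]⟩
          · rw [← hr] at hp'
            obtain ⟨v, hv, rfl⟩ := (ihm p).mp hp'
            refine ⟨v, ?_, ?_⟩
            · rw [List.map_cons]; exact List.mem_cons_of_mem _ hv
            · have hne : (k i == v) = false := by
                rw [beq_eq_false_iff_ne]
                exact (hgt' v hv).ne
              simp [List.filter_cons, hne]
        · rintro ⟨v, hv, rfl⟩
          by_cases hvi : v = k i
          · subst hvi
            rw [hfili]
            exact List.mem_cons_self
          · have hvrest : v ∈ (j :: t).map k := by
              rcases List.mem_cons.mp (by rwa [List.map_cons] at hv) with h1 | h1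
              · exact absurd h1 hvi
              · exact h1
            have hne : (k i == v) = false := by
              rw [beq_eq_false_iff_ne]
              exact fun h' => hvi h'.symm
            have hfil2 : (i :: j :: t).filter (fun i' => k i' == v)
                = (j :: t).filter (fun i' => k i' == v) := by
              simp [List.filter_cons, hne]
            rw [hfil2]
            have hmem' : ((j :: t).filter (fun i' => k i' == v), v) ∈ pvRuns k (j :: t) :=
              (ihm _).mpr ⟨v, hvrest, rfl⟩
            exact List.mem_cons_of_mem _ (hr ▸ hmem')

theorem pv_insertBy_cons (f : Int → Int → Bool) (x y : Int) (ys : List Int) :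
    PySem.List.insertBy f x (y :: ys)
      = if f x y then x :: y :: ys else y :: PySem.List.insertBy f x ys := rfl

theorem pv_insertBy_cons_pos (k : Int → String) (x y : Int) (ys : List Int)
    (h : decide (k x < k y) = true) :
    PySem.List.insertBy (fun a b => decide (k a < k b)) x (y :: ys) = x :: y :: ys := by
  rw [pv_insertBy_cons]; rw [h]; simp

theorem pv_insertBy_cons_neg (k : Int → String) (x y : Int) (ys : List Int)
    (h : decide (k x < k y) = false) :
    PySem.List.insertBy (fun a b => decide (k a < k b)) x (y :: ys)
      = y :: PySem.List.insertBy (fun a b => decide (k a < k b)) x ys := by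
  rw [pv_insertBy_cons]; rw [h]; simp

theorem pv_insertBy_pairwise (k : Int → String) (x : Int) :
    ∀ acc : List Int, acc.Pairwise (fun a b => k a ≤ k b) →
      (PySem.List.insertBy (fun a b => decide (k a < k b)) x acc).Pairwise
        (fun a b => k a ≤ k b) := by
  intro acc
  induction acc with
  | nil => intro _; simp [PySem.List.insertBy]
  | cons y ys ih =>
    intro h
    obtain ⟨hy, hys⟩ := List.pairwise_cons.mp h
    by_cases hxy : k x < k y
    · rw [pv_insertBy_cons_pos k x y ys (by simpa using hxy)]
      refine List.pairwise_cons.mpr ⟨?_, h⟩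
      intro b hb
      rcases List.mem_cons.mp hb with rfl | hb'
      · exact hxy.le
      · exact hxy.le.trans (hy b hb')
    · rw [pv_insertBy_cons_neg k x y ys (by simpa using hxy)]
      refine List.pairwise_cons.mpr ⟨?_, ih hys⟩
      intro b hb
      rcases (PySem.List.mem_insertBy _ _ _ _).mp hb with rfl | hb'
      · exact le_of_not_gt hxy
      · exact hy b hb'

theorem pv_filter_insertBy (k : Int → String) (x : Int) (v : String) :
    ∀ acc : List Int, acc.Pairwise (fun a b => k a ≤ k b) →
      (PySem.List.insertBy (fun a b => decide (k a < k b)) x acc).filter (fun i => k i == v)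
        = if (k x == v) = true then acc.filter (fun i => k i == v) ++ [x]
          else acc.filter (fun i => k i == v) := by
  intro acc
  induction acc with
  | nil =>
    intro _
    by_cases hxv : (k x == v) = true <;> simp [PySem.List.insertBy, hxv]
  | cons y ys ih =>
    intro h
    obtain ⟨hy, hys⟩ := List.pairwise_cons.mp h
    by_cases hxy : k x < k y
    · rw [pv_insertBy_cons_pos k x y ys (by simpa using hxy)]
      by_cases hxv : (k x == v) = true
      · have hxe : k x = v := eq_of_beq hxv
        have hnil : (y :: ys).filter (fun i => k i == v) = [] := by
          apply List.filter_eq_nil_iff.mpr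
          intro a ha
          have hav : k x < k a := by
            rcases List.mem_cons.mp ha with rfl | ha'
            · exact hxy
            · exact hxy.trans_le (hy a ha')
          simp only [← hxe, beq_iff_eq]
          exact hav.ne'
        simp [hxv, hnil]
      · simp [List.filter_cons, hxv]
    · rw [pv_insertBy_cons_neg k x y ys (by simpa using hxy)]
      rw [List.filter_cons, List.filter_cons, ih hys]
      by_cases hxv : (k x == v) = true <;> by_cases hyv : (k y == v) = true <;>
        simp [hxv, hyv]

theorem pv_filter_foldl (k : Int → String) (v : String) :
    ∀ (l acc : List Int), acc.Pairwise (fun a b => k a ≤ k b) →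
      (l.foldl (fun acc x => PySem.List.insertBy (fun a b => decide (k a < k b)) x acc)
          acc).filter (fun i => k i == v)
        = acc.filter (fun i => k i == v) ++ l.filter (fun i => k i == v) := by
  intro l
  induction l with
  | nil => intro acc _; simp
  | cons x xs ih =>
    intro acc h
    simp only [List.foldl_cons]
    rw [ih _ (pv_insertBy_pairwise k x acc h), pv_filter_insertBy k x v acc h]
    by_cases hxv : (k x == v) = true <;> simp [hxv]

-- stability: filtering one key class out of the sorted list gives the original order
theorem pv_filter_sorted (k : Int → String) (l : List Int) (v : String) :
    (PySem.List.sorted l k false).filter (fun i => k i == v) = l.filter (fun i => k i == v) := by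
  rw [PySem.List.sorted_eq_foldl_insertBy]
  simpa using pv_filter_foldl k v l [] (by simp)

-- A's bucket dict, as swapped items: one (bucket, value) pair per distinct value
theorem pv_indices_items (k : Int → String) (l : List Int) :
    ((l.foldl (fun b i => b.modify (k i) [] (fun occ => occ ++ [i]))
        (PySem.Dict.empty : PySem.Dict String (List Int))).items).map (fun q => (q.2, q.1))
      = (PySem.Set.ofList (l.map k)).map (fun v => (l.filter (fun i => k i == v), v)) := by
  have hnd : ((l.foldl (fun b i => b.modify (k i) [] (fun occ => occ ++ [i]))
      (PySem.Dict.empty : PySem.Dict String (List Int))).keys).Nodup := by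
    apply PySem.Dict.nodup_keys_foldl_modify_key
    simp
  have hkeys : ((l.foldl (fun b i => b.modify (k i) [] (fun occ => occ ++ [i]))
      (PySem.Dict.empty : PySem.Dict String (List Int))).keys) = PySem.Set.ofList (l.map k) := by
    rw [PySem.Dict.keys_foldl_modify_key]
    simp [PySem.Set.update_nil_left]
  have hgetD : ∀ v, ((l.foldl (fun b i => b.modify (k i) [] (fun occ => occ ++ [i]))
      (PySem.Dict.empty : PySem.Dict String (List Int))).getD v []) = l.filter (fun i => k i == v) := by
    intro v
    have h1 : (l.foldl (fun b i => b.modify (k i) [] (fun occ => occ ++ [i]))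
        (PySem.Dict.empty : PySem.Dict String (List Int)))
        = ((l.map (fun i => (k i, i))).foldl
            (fun d p => d.modify p.1 [] (fun occ => occ ++ [p.2]))
            (PySem.Dict.empty : PySem.Dict String (List Int))) := by
      rw [List.foldl_map]
    rw [h1, PySem.Dict.getD_foldl_modify_append]
    simp [List.filter_map, List.map_map, Function.comp_def]
  rw [PySem.Dict.items_eq_map_keys _ hnd ([] : List Int), hkeys, List.map_map]
  apply List.map_congr_left
  intro v _
  simp [hgetD v]

-- The inner computation of A equals the inner computation of B.
theorem pv_inner_eq (k : Int → String) (l : List Int) :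
    PySem.List.sorted
      (PySem.List.sorted2
        (((l.foldl (fun b i => b.modify (k i) [] (fun occ => occ ++ [i]))
            (PySem.Dict.empty : PySem.Dict String (List Int))).items).map (fun q => (q.2, q.1)))
        (fun t => t.1) (fun t => t.2) false)
      (fun t => t.2) false
    = pvRuns k (PySem.List.sorted l k false) := by
  have hxs : (PySem.List.sorted l k false).Pairwise (fun a b => k a ≤ k b) :=
    PySem.List.sorted_pairwise l k
  have hperm_xl : (PySem.List.sorted l k false).Perm l := PySem.List.sorted_perm l k false
  have hmem : ∀ p, p ∈ pvRuns k (PySem.List.sorted l k false) ↔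
      p ∈ (PySem.Set.ofList (l.map k)).map (fun v => (l.filter (fun i => k i == v), v)) := by
    intro p
    rw [pvRuns_mem k _ hxs p]
    constructor
    · rintro ⟨v, hv, rfl⟩
      refine List.mem_map.mpr ⟨v, ?_, ?_⟩
      · exact (PySem.Set.mem_ofList _ _).mpr ((hperm_xl.map k).mem_iff.mp hv)
      · rw [pv_filter_sorted k l v]
    · intro hmem'
      obtain ⟨v, hv, rfl⟩ := List.mem_map.mp hmem'
      exact ⟨v, (hperm_xl.map k).mem_iff.mpr ((PySem.Set.mem_ofList _ _).mp hv),
        by rw [pv_filter_sorted k l v]⟩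
  have hnd1 : (pvRuns k (PySem.List.sorted l k false)).Nodup := by
    have hp := pvRuns_pairwise k _ hxs
    exact List.Pairwise.imp (fun {a b} hlt he => absurd (he ▸ hlt) (lt_irrefl _)) hp
  have hnd2 : ((PySem.Set.ofList (l.map k)).map
      (fun v => (l.filter (fun i => k i == v), v))).Nodup :=
    (PySem.Set.nodup_ofList _).map (fun a b hab => congrArg Prod.snd hab)
  have hperm : (pvRuns k (PySem.List.sorted l k false)).Perm
      ((PySem.Set.ofList (l.map k)).map (fun v => (l.filter (fun i => k i == v), v))) :=
    (List.perm_ext_iff_of_nodup hnd1 hnd2).mpr hmem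
  rw [pv_indices_items k l]
  apply PySem.List.sorted_eq_of_perm_of_pairwise_lt
  · exact hperm.trans (PySem.List.sorted2_perm _ _ _ _).symm
  · exact pvRuns_pairwise k _ hxs

-- ===== VERDICT (by name: the statement is the Claim_ definition above) =====
theorem compute_stratified_group_data_spec : Claim_equal_compute_stratified_group_data := by
  intro data_dict stratified_group_indices all_stratified_groups _hdom _hpre
  unfold Spec_compute_stratified_group_data
  unfold compute_stratified_group_data compute_stratified_group_data_alt
  simp only [pv_inner_eq]
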